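-- pv_equiv track=rewrite | github.com/lijepoime/Algoritmi | BA1L.py | ptn
-- ===== SOURCE A (Python) =====
-- def ptn(pattern):
--   k=len(pattern)
--   n=0
--   lista=list(pattern)
--   for i in range(k):
--     if(lista[i]=="C"):
--       n+=4**(k-i-1)
--     elif(lista[i]=="G"):
--       n+=2*4**(k-i-1)
--     elif(lista[i]=="T"):
--       n+=3*4**(k-i-1)
--
--
--   return n
-- ===== SOURCE B (Python) =====
-- def ptn(pattern):
--     d = {"C": 1, "G": 2, "T": 3}
--     n = 0
--     for c in pattern:
--         n = n * 4 + d.get(c, 0)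
--     return n
-- ===== Notes on version B (the rewrite author's own statement) =====
-- stated objective: simpler
-- what changed: Replaces per-position exponentiation 4**(k-i-1) over an indexed list with a single Horner pass n = n*4 + digit using a dict lookup.
import Mathlib
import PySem

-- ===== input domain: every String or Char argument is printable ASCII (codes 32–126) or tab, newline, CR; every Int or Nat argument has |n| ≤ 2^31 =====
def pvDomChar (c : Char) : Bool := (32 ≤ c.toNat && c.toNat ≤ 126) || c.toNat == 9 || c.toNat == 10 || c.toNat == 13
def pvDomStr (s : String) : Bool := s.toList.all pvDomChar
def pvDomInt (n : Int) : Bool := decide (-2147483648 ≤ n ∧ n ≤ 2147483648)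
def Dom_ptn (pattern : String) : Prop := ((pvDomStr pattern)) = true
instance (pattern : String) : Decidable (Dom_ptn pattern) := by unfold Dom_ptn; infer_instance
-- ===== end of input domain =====

-- B replaces per-position exponentiation with a single Horner pass (n = n*4 + digit); proved equal for all strings.


-- ===== PORT A =====
-- loop body of A: for each (char, index), add coefficient * 4^(k-i-1)
def ptnStep (k : Nat) (n : Int) (ci : Char × Nat) : Int :=
  if ci.1 = 'C' then n + (4 : Int) ^ (k - ci.2 - 1)
  else if ci.1 = 'G' then n + 2 * (4 : Int) ^ (k - ci.2 - 1)
  else if ci.1 = 'T' then n + 3 * (4 : Int) ^ (k - ci.2 - 1)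
  else n

def ptn (pattern : String) : Int :=
  let lista := pattern.toList
  let k := lista.length
  lista.zipIdx.foldl (ptnStep k) 0

-- ===== PORT B =====
-- d.get(c, 0)
def ptnDigit (c : Char) : Int :=
  (PySem.Dict.mk [('C', (1 : Int)), ('G', 2), ('T', 3)]).getD c 0

def ptn_alt (pattern : String) : Int :=
  pattern.toList.foldl (fun n c => n * 4 + ptnDigit c) 0

-- ===== PRECONDITION & SPEC =====
def Spec_ptn (pattern : String) (out : Int) : Prop := out = ptn_alt pattern
instance (pattern : String) (out : Int) : Decidable (Spec_ptn pattern out) := by unfold Spec_ptn; infer_instance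

-- ===== CLAIM (what is proved, stated in full; the proofs are below) =====
def Claim_equal_ptn : Prop := ∀ (pattern : String), Dom_ptn pattern → Spec_ptn pattern (ptn pattern)

-- ===== LEMMAS AND PROOFS =====

-- the common value both folds compute, by structural recursion
def ptnVal : List Char → Int
  | [] => 0
  | c :: r => ptnDigit c * (4 : Int) ^ r.length + ptnVal r

theorem ptnStep_eq (k : Nat) (n : Int) (ci : Char × Nat) :
    ptnStep k n ci = n + ptnDigit ci.1 * (4 : Int) ^ (k - ci.2 - 1) := by
  unfold ptnStep ptnDigit
  split_ifs with h1 h2 h3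
  · rw [h1]; simp [PySem.Dict.getD, PySem.Dict.get?, List.find?]
  · rw [h2]; simp [PySem.Dict.getD, PySem.Dict.get?, List.find?]
  · rw [h3]; simp [PySem.Dict.getD, PySem.Dict.get?, List.find?]
  · have e1 : ('C' == ci.1) = false := by simp only [beq_eq_false_iff_ne]; exact fun e => h1 e.symm
    have e2 : ('G' == ci.1) = false := by simp only [beq_eq_false_iff_ne]; exact fun e => h2 e.symm
    have e3 : ('T' == ci.1) = false := by simp only [beq_eq_false_iff_ne]; exact fun e => h3 e.symm
    simp [PySem.Dict.getD, PySem.Dict.get?, List.find?, e1, e2, e3]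

theorem ptn_fold_eq (k : Nat) (l : List Char) (j : Nat) (n : Int)
    (h : j + l.length = k) :
    (l.zipIdx j).foldl (ptnStep k) n = n + ptnVal l := by
  induction l generalizing j n with
  | nil => simp [ptnVal]
  | cons c r ih =>
      simp only [List.zipIdx_cons, List.foldl_cons]
      rw [ih (j + 1) _ (by simp at h ⊢; omega)]
      rw [ptnStep_eq]
      have hk : k - j - 1 = r.length := by simp at h; omega
      simp [ptnVal, hk]; ring

theorem ptn_alt_fold_eq (l : List Char) (n : Int) :
    l.foldl (fun n c => n * 4 + ptnDigit c) n = n * (4 : Int) ^ l.length + ptnVal l := by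
  induction l generalizing n with
  | nil => simp [ptnVal]
  | cons c r ih =>
      simp only [List.foldl_cons]
      rw [ih]
      simp [ptnVal, pow_succ]
      ring

-- ===== VERDICT (by name: the statement is the Claim_ definition above) =====
theorem ptn_spec : Claim_equal_ptn := by
  intro pattern _
  unfold Spec_ptn ptn ptn_alt
  rw [ptn_fold_eq _ _ 0 0 (by simp), ptn_alt_fold_eq]
  simp
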